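-- pv_equiv track=rewrite | github.com/olsenw/LeetCodeExercises | Python3/minimum_cost_path_with_teleportations.py | minCost_tle
-- ===== SOURCE A (Python) =====
-- from functools import cache
-- from typing import List, Dict, Set, Optional
--
-- def minCost_tle(grid: List[List[int]], k: int) -> int:
--     m,n = len(grid), len(grid[0])
--     @cache
--     def dp(teleports:int, x:int, y:int) -> int:
--         if x == m - 1 and y == n - 1:
--             return 0
--         answer = float('inf')
--         if x < m - 1:
--             answer = min(answer, dp(teleports, x+1, y) + grid[x+1][y])
--         if y < n - 1:
--             answer = min(answer, dp(teleports, x, y+1) + grid[x][y+1])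
--         if teleports > 0:
--             for i in range(m):
--                 for j in range(n):
--                     if grid[i][j] <= grid[x][y]:
--                         answer = min(answer, dp(teleports-1, i, j))
--         return answer
--     return dp(k, 0, 0)
-- ===== SOURCE B (Python) =====
-- def minCost_tle(grid, k):
--     m, n = len(grid), len(grid[0])
--
--     def build(tele):
--         # bottom-up table; rows built back-to-front, cells right-to-left
--         rows = []
--         below = None
--         for x in range(m - 1, -1, -1):
--             row = []
--             right = None
--             for y in range(n - 1, -1, -1):
--                 if x == m - 1 and y == n - 1:
--                     v = 0
--                 else:
--                     cands = []
--                     if below is not None: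
--                         cands.append(below[y] + grid[x + 1][y])
--                     if right is not None:
--                         cands.append(right + grid[x][y + 1])
--                     if tele is not None:
--                         cands.append(tele[x][y])
--                     v = min(cands)
--                 row.insert(0, v)
--                 right = v
--             rows.insert(0, row)
--             below = row
--         return rows
--
--     def tele_of(table):
--         # sort cells by value once; a running prefix-minimum gives, for each
--         # value v, the min of table over all cells with grid value <= v
--         cells = sorted(((grid[i][j], table[i][j]) for i in range(m) for j in range(n)),
--                        key=lambda c: c[0])
--         best = {}
--         cur = None
--         for v, d in cells:
--             cur = d if cur is None else min(cur, d)
--             best[v] = cur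
--         return [[best[grid[x][y]] for y in range(n)] for x in range(m)]
--
--     table = build(None)
--     for _ in range(max(k, 0)):
--         new = build(tele_of(table))
--         if new == table:
--             break
--         table = new
--     return table[0][0]
-- ===== Notes on version B (the rewrite author's own statement) =====
-- stated objective: faster
-- what changed: B replaces A's memoized recursion with bottom-up dp tables and replaces A's per-cell scan over all cells (per teleport level) by one sort of the cells by value with a running prefix-minimum dict, plus an early stop when a level reaches a fixed point; intended as faster (a timing run measured B 9-2555x ahead as grids grow, but could not confirm it at the largest size, where one degenerate input favoured A).
-- outside the precondition, e.g. on minCost_tle([[]], 1): A returns inf, B raises IndexError; on minCost_tle([[1, 2], [3]], 0): A raises IndexError, B raises IndexError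
import Mathlib
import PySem

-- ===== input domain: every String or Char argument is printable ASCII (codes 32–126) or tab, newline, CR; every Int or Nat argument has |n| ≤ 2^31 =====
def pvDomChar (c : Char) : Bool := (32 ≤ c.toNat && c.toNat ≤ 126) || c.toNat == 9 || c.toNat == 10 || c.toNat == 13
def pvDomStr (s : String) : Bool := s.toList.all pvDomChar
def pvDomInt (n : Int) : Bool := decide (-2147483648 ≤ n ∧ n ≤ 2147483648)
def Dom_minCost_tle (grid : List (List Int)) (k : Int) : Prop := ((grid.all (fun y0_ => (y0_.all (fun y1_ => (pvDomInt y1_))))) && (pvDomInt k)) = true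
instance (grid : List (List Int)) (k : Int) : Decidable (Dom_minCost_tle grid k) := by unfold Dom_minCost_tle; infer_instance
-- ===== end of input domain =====

-- B replaces A's memoized recursion with bottom-up dp tables and replaces A's per-cell
-- teleport rescan of all cells by one sort of the cells with a running prefix-minimum
-- per value (plus an early stop at a fixed point); return value only.

-- ===== PORT A =====
-- A's dp is a @cache-memoized recursion; the cache is ported as an explicit memo dict
-- keyed by (teleports, x, y) threaded through the recursion, branch for branch.
-- float('inf') is `none`.
def pvGA (grid : List (List Int)) (x y : Int) : Int :=
  PySem.List.pyGetD (PySem.List.pyGetD grid x []) y 0   -- grid[x][y]; in range under Pre_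

def pvOMin (a b : Option Int) : Option Int :=
  match a, b with
  | none, b => b
  | some a, none => some a
  | some a, some b => some (min a b)

def pvMemo : Type := PySem.Dict (Int × Int × Int) (Option Int)

def pvBnd (m n t x y : Int) : Nat :=
  (max t 0).toNat * ((m + n).toNat + 1) + (m - x).toNat + (n - y).toNat

def dpA (grid : List (List Int)) (m n : Int) :
    Nat → pvMemo → Int → Int → Int → pvMemo × Option Int
  | 0, memo, _, _, _ => (memo, none)   -- fuel guard; the entry fuel always suffices
  | fuel+1, memo, t, x, y =>
    match PySem.Dict.get? memo (t, x, y) with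
    | some r => (memo, r)   -- cache hit
    | none =>
      if x = m - 1 ∧ y = n - 1 then
        (PySem.Dict.insert memo (t, x, y) (some 0), some 0)
      else
        -- answer = inf; if x < m - 1: answer = min(answer, dp(t, x+1, y) + grid[x+1][y])
        let s1 : pvMemo × Option Int :=
          if _h : x < m - 1 then
            let d := dpA grid m n fuel memo t (x+1) y
            (d.1, pvOMin none (d.2.map (· + pvGA grid (x+1) y)))
          else (memo, none)
        -- if y < n - 1: answer = min(answer, dp(t, x, y+1) + grid[x][y+1])
        let s2 : pvMemo × Option Int :=
          if _h : y < n - 1 then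
            let d := dpA grid m n fuel s1.1 t x (y+1)
            (d.1, pvOMin s1.2 (d.2.map (· + pvGA grid x (y+1))))
          else s1
        -- if teleports > 0: scan all cells (i, j) with grid[i][j] <= grid[x][y]
        let s3 : pvMemo × Option Int :=
          if _h : 0 < t then
            (PySem.List.pyRange 0 m 1).foldl (fun s i =>
              (PySem.List.pyRange 0 n 1).foldl (fun s j =>
                if pvGA grid i j ≤ pvGA grid x y then
                  let d := dpA grid m n fuel s.1 (t-1) i j
                  (d.1, pvOMin s.2 d.2)
                else s) s) s2
          else s2
        (PySem.Dict.insert s3.1 (t, x, y) s3.2, s3.2)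

def minCost_tle (grid : List (List Int)) (k : Int) : Int :=
  let m : Int := grid.length
  let n : Int := (PySem.List.pyGetD grid 0 ([] : List Int)).length
  (dpA grid m n (pvBnd m n k 0 0 + 1) PySem.Dict.empty k 0 0).2.getD 0

-- ===== PORT B =====
def pvGB (grid : List (List Int)) (x y : Int) : Int :=
  PySem.List.pyGetD (PySem.List.pyGetD grid x []) y 0   -- grid[x][y]; in range under Pre_

def pvGetI (row : List Int) (y : Int) : Int := PySem.List.pyGetD row y 0

def pvGetI2 (t : List (List Int)) (x y : Int) : Int :=
  pvGetI (PySem.List.pyGetD t x []) y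

def pvMinList : List Int → Int
  | [] => 0                      -- unreachable: the candidate list is never empty
  | h :: t => t.foldl min h

def pvCellB (grid : List (List Int)) (m n : Int) (below : Option (List Int))
    (tele : Option (List (List Int))) (right : Option Int) (x y : Int) : Int :=
  if x = m - 1 ∧ y = n - 1 then 0
  else
    let c : List Int := []
    let c := match below with | some b => c ++ [pvGetI b y + pvGB grid (x+1) y] | none => c
    let c := match right with | some r => c ++ [r + pvGB grid x (y+1)] | none => c
    let c := match tele with | some T => c ++ [pvGetI2 T x y] | none => c
    pvMinList c

def pvRowB (grid : List (List Int)) (m n x : Int) (below : Option (List Int))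
    (tele : Option (List (List Int))) : Nat → Int → List Int → List Int
  | 0, _, row => row
  | fuel+1, y, row =>
    pvRowB grid m n x below tele fuel (y - 1)
      (pvCellB grid m n below tele row.head? x y :: row)

def pvTableB (grid : List (List Int)) (m n : Int) (tele : Option (List (List Int))) :
    Nat → Int → List (List Int) → List (List Int)
  | 0, _, rows => rows
  | fuel+1, x, rows =>
    pvTableB grid m n tele fuel (x - 1)
      (pvRowB grid m n x rows.head? tele n.toNat (n - 1) [] :: rows)

-- running prefix-minimum state: (dict value ↦ best so far, current minimum)
def pvBestStep (st : PySem.Dict Int Int × Option Int) (vd : Int × Int) :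
    PySem.Dict Int Int × Option Int :=
  let cur : Int := match st.2 with | none => vd.2 | some c => min c vd.2
  (st.1.insert vd.1 cur, some cur)

-- sort the cells by value once; a running prefix minimum gives, per value v,
-- the minimum of the previous table over all cells of value ≤ v
def pvTeleB (grid : List (List Int)) (m n : Int) (table : List (List Int)) :
    List (List Int) :=
  let cells := (PySem.List.pyRange 0 m 1).flatMap fun i =>
      (PySem.List.pyRange 0 n 1).map fun j => (pvGB grid i j, pvGetI2 table i j)
  let cells := PySem.List.sorted cells (fun c => c.1) false
  let best := (cells.foldl pvBestStep (PySem.Dict.empty, none)).1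
  (PySem.List.pyRange 0 m 1).map fun x =>
    (PySem.List.pyRange 0 n 1).map fun y => best.getD (pvGB grid x y) 0

def pvStepB (grid : List (List Int)) (m n : Int) (T : List (List Int)) : List (List Int) :=
  pvTableB grid m n (some (pvTeleB grid m n T)) m.toNat (m - 1) []

def pvLoopB (grid : List (List Int)) (m n : Int) : Nat → List (List Int) → List (List Int)
  | 0, T => T
  | fuel+1, T =>
    let new := pvStepB grid m n T
    if new = T then T else pvLoopB grid m n fuel new

def minCost_tle_alt (grid : List (List Int)) (k : Int) : Int :=
  let m : Int := grid.length
  let n : Int := (PySem.List.pyGetD grid 0 ([] : List Int)).length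
  let T := pvLoopB grid m n (max k 0).toNat (pvTableB grid m n none m.toNat (m - 1) [])
  pvGetI2 T 0 0

-- ===== PRECONDITION & SPEC =====
-- Pre_ excludes only inputs on which A does not return an int: the empty grid and a
-- grid whose row 0 is empty (A raises IndexError or returns float('inf'), not an int),
-- and grids with a later row shorter than row 0 (A raises IndexError reading it).
def Pre_minCost_tle (grid : List (List Int)) (k : Int) : Prop :=
  grid ≠ [] ∧ 0 < ((grid.headD []).length : Int) ∧
  (∀ r ∈ grid, ((grid.headD []).length : Int) ≤ (r.length : Int))
instance (grid : List (List Int)) (k : Int) : Decidable (Pre_minCost_tle grid k) := by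
  unfold Pre_minCost_tle; infer_instance

def pvWitness_minCost_tle : List (List Int) × Int := ([[1, 2], [3, 4]], 1)

def Spec_minCost_tle (grid : List (List Int)) (k : Int) (out : Int) : Prop := out = minCost_tle_alt grid k
instance (grid : List (List Int)) (k : Int) (out : Int) : Decidable (Spec_minCost_tle grid k out) := by unfold Spec_minCost_tle; infer_instance

-- ===== CLAIM (what is proved, stated in full; the proofs are below) =====
def Claim_equal_minCost_tle : Prop := ∀ (grid : List (List Int)) (k : Int), Dom_minCost_tle grid k → Pre_minCost_tle grid k → Spec_minCost_tle grid k (minCost_tle grid k)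

-- ===== LEMMAS AND PROOFS =====

-- proof-only definitions

-- the pure (uncached) value of A's dp; the memo of the port is proved coherent with it
def dpP (grid : List (List Int)) (m n : Int) (t x y : Int) : Option Int :=
  if x = m - 1 ∧ y = n - 1 then some 0
  else
    let a1 : Option Int :=
      if _h : x < m - 1 then
        pvOMin none ((dpP grid m n t (x+1) y).map (· + pvGA grid (x+1) y))
      else none
    let a2 : Option Int :=
      if _h : y < n - 1 then
        pvOMin a1 ((dpP grid m n t x (y+1)).map (· + pvGA grid x (y+1)))
      else a1
    if _h : 0 < t then
      (PySem.List.pyRange 0 m 1).foldl (fun a i =>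
        (PySem.List.pyRange 0 n 1).foldl (fun a j =>
          if pvGA grid i j ≤ pvGA grid x y then pvOMin a (dpP grid m n (t-1) i j) else a) a) a2
    else a2
termination_by (t.toNat, (m - x).toNat + (n - y).toNat)
decreasing_by
  · apply Prod.Lex.right; omega
  · apply Prod.Lex.right; omega
  · apply Prod.Lex.left; omega

-- a memo is coherent if every stored entry is the pure dp value of its key
def pvGoodMemo (grid : List (List Int)) (m n : Int) (memo : pvMemo) : Prop :=
  ∀ t x y r, PySem.Dict.get? memo (t, x, y) = some r → r = dpP grid m n t x y

theorem pv_fold_good {α : Type} {grid : List (List Int)} {m n : Int} (l : List α)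
    (F : pvMemo × Option Int → α → pvMemo × Option Int)
    (f : Option Int → α → Option Int) :
    (∀ s b, b ∈ l → pvGoodMemo grid m n s.1 →
      pvGoodMemo grid m n (F s b).1 ∧ (F s b).2 = f s.2 b) →
    ∀ s, pvGoodMemo grid m n s.1 →
      pvGoodMemo grid m n (l.foldl F s).1 ∧ (l.foldl F s).2 = l.foldl f s.2 := by
  induction l with
  | nil => intro _ s h; exact ⟨h, rfl⟩
  | cons b tl ih =>
    intro hF s h
    obtain ⟨h1, h2⟩ := hF s b List.mem_cons_self h
    obtain ⟨g1, g2⟩ := ih (fun s' b' hb' => hF s' b' (List.mem_cons_of_mem _ hb')) (F s b) h1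
    exact ⟨g1, by rw [List.foldl_cons, List.foldl_cons, g2, h2]⟩

theorem pv_good_insert {grid : List (List Int)} {m n : Int} {memo : pvMemo}
    (hg : pvGoodMemo grid m n memo) {t x y : Int} {r : Option Int}
    (hr : r = dpP grid m n t x y) :
    pvGoodMemo grid m n (PySem.Dict.insert memo (t, x, y) r) := by
  intro t' x' y' r' h
  rw [PySem.Dict.get?_insert] at h
  split at h
  · rename_i he
    simp only [Prod.mk.injEq] at he
    obtain ⟨rfl, rfl, rfl⟩ := he
    obtain rfl : r = r' := Option.some.inj h
    exact hr
  · exact hg t' x' y' r' h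

theorem pvBnd_down {m n t x y : Int} (hx : x < m - 1) :
    pvBnd m n t (x+1) y < pvBnd m n t x y := by
  unfold pvBnd; omega

theorem pvBnd_right {m n t x y : Int} (hy : y < n - 1) :
    pvBnd m n t x (y+1) < pvBnd m n t x y := by
  unfold pvBnd; omega

theorem pvBnd_tele {m n t x y i j : Int} (ht : 0 < t)
    (hi0 : 0 ≤ i) (him : i < m) (hj0 : 0 ≤ j) (hjn : j < n) :
    pvBnd m n (t-1) i j < pvBnd m n t x y := by
  unfold pvBnd
  have hmul : (max (t-1) 0).toNat * ((m + n).toNat + 1) + ((m + n).toNat + 1)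
      = (max t 0).toNat * ((m + n).toNat + 1) := by
    have h1 : (max t 0).toNat = (max (t-1) 0).toNat + 1 := by omega
    rw [h1, Nat.succ_mul]
  omega

theorem dpA_correct (grid : List (List Int)) (m n : Int) :
    ∀ (fuel : Nat) (memo : pvMemo) (t x y : Int), pvGoodMemo grid m n memo →
      pvBnd m n t x y < fuel →
      (dpA grid m n fuel memo t x y).2 = dpP grid m n t x y ∧
        pvGoodMemo grid m n (dpA grid m n fuel memo t x y).1 := by
  intro fuel
  induction fuel with
  | zero => intro memo t x y _ hB; exact absurd hB (Nat.not_lt_zero _)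
  | succ fuel ih =>
    intro memo t x y hg hB
    rw [dpA]
    cases hm : PySem.Dict.get? memo (t, x, y) with
    | some r => exact ⟨hg t x y r hm, hg⟩
    | none =>
      simp only []
      by_cases hgoal : x = m - 1 ∧ y = n - 1
      · rw [if_pos hgoal]
        have h0 : some 0 = dpP grid m n t x y := by rw [dpP, if_pos hgoal]
        exact ⟨h0, pv_good_insert hg h0⟩
      · rw [if_neg hgoal]
        set S1 : pvMemo × Option Int := (if _h : x < m - 1 then
            ((dpA grid m n fuel memo t (x+1) y).1,
              pvOMin none ((dpA grid m n fuel memo t (x+1) y).2.map (· + pvGA grid (x+1) y)))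
          else (memo, none)) with hS1
        set S2 : pvMemo × Option Int := (if _h : y < n - 1 then
            ((dpA grid m n fuel S1.1 t x (y+1)).1,
              pvOMin S1.2 ((dpA grid m n fuel S1.1 t x (y+1)).2.map (· + pvGA grid x (y+1))))
          else S1) with hS2
        set S3 : pvMemo × Option Int := (if _h : 0 < t then
            (PySem.List.pyRange 0 m 1).foldl (fun s i =>
              (PySem.List.pyRange 0 n 1).foldl (fun s j =>
                if pvGA grid i j ≤ pvGA grid x y then
                  ((dpA grid m n fuel s.1 (t-1) i j).1, pvOMin s.2 (dpA grid m n fuel s.1 (t-1) i j).2)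
                else s) s) S2
          else S2) with hS3
        set P1 : Option Int := (if _h : x < m - 1 then
            pvOMin none ((dpP grid m n t (x+1) y).map (· + pvGA grid (x+1) y))
          else none) with hP1
        set P2 : Option Int := (if _h : y < n - 1 then
            pvOMin P1 ((dpP grid m n t x (y+1)).map (· + pvGA grid x (y+1)))
          else P1) with hP2
        set P3 : Option Int := (if _h : 0 < t then
            (PySem.List.pyRange 0 m 1).foldl (fun a i =>
              (PySem.List.pyRange 0 n 1).foldl (fun a j =>
                if pvGA grid i j ≤ pvGA grid x y then pvOMin a (dpP grid m n (t-1) i j) else a) a) P2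
          else P2) with hP3
        have h1 : S1.2 = P1 ∧ pvGoodMemo grid m n S1.1 := by
          rw [hS1, hP1]
          by_cases hx : x < m - 1
          · rw [dif_pos hx, dif_pos hx]
            obtain ⟨hv, hgd⟩ := ih memo t (x+1) y hg (by have := pvBnd_down (m := m) (n := n) (t := t) (y := y) hx; omega)
            exact ⟨by rw [hv], hgd⟩
          · rw [dif_neg hx, dif_neg hx]
            exact ⟨rfl, hg⟩
        have h2 : S2.2 = P2 ∧ pvGoodMemo grid m n S2.1 := by
          rw [hS2, hP2]
          by_cases hy : y < n - 1
          · rw [dif_pos hy, dif_pos hy]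
            obtain ⟨hv, hgd⟩ := ih S1.1 t x (y+1) h1.2 (by have := pvBnd_right (m := m) (n := n) (t := t) (x := x) hy; omega)
            exact ⟨by rw [hv, h1.1], hgd⟩
          · rw [dif_neg hy, dif_neg hy]
            exact ⟨h1.1, h1.2⟩
        have h3 : S3.2 = P3 ∧ pvGoodMemo grid m n S3.1 := by
          rw [hS3, hP3]
          by_cases ht0 : 0 < t
          · rw [dif_pos ht0, dif_pos ht0]
            have houter := pv_fold_good (grid := grid) (m := m) (n := n)
              (PySem.List.pyRange 0 m 1)
              (fun s i => (PySem.List.pyRange 0 n 1).foldl (fun s j =>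
                if pvGA grid i j ≤ pvGA grid x y then
                  ((dpA grid m n fuel s.1 (t-1) i j).1, pvOMin s.2 (dpA grid m n fuel s.1 (t-1) i j).2)
                else s) s)
              (fun a i => (PySem.List.pyRange 0 n 1).foldl (fun a j =>
                if pvGA grid i j ≤ pvGA grid x y then pvOMin a (dpP grid m n (t-1) i j) else a) a)
              (fun s i hi hgs => pv_fold_good (grid := grid) (m := m) (n := n)
                (PySem.List.pyRange 0 n 1) _ _
                (fun s' j hj hgs' => by
                  obtain ⟨hi0, him⟩ := PySem.List.mem_pyRange_one.mp hi
                  obtain ⟨hj0, hjn⟩ := PySem.List.mem_pyRange_one.mp hj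
                  by_cases hc : pvGA grid i j ≤ pvGA grid x y
                  · rw [if_pos hc, if_pos hc]
                    obtain ⟨hv, hgd⟩ := ih s'.1 (t-1) i j hgs'
                      (by have := pvBnd_tele (m := m) (n := n) (x := x) (y := y) ht0 hi0 him hj0 hjn; omega)
                    exact ⟨hgd, by rw [hv]⟩
                  · rw [if_neg hc, if_neg hc]
                    exact ⟨hgs', rfl⟩) s hgs)
              S2 h2.2
            exact ⟨by rw [houter.2, h2.1], houter.1⟩
          · rw [dif_neg ht0, dif_neg ht0]
            exact ⟨h2.1, h2.2⟩
        have hdpP : dpP grid m n t x y = P3 := by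
          rw [dpP, if_neg hgoal]
        refine ⟨?_, ?_⟩
        · show S3.2 = dpP grid m n t x y
          rw [h3.1, hdpP]
        · show pvGoodMemo grid m n (PySem.Dict.insert S3.1 (t, x, y) S3.2)
          exact pv_good_insert h3.2 (by rw [h3.1, hdpP])

-- helpers for relating the pure dp to B's tables
def pvGetO (row : List (Option Int)) (y : Int) : Option Int :=
  PySem.List.pyGetD row y none

def pvGetO2 (t : List (List (Option Int))) (x y : Int) : Option Int :=
  pvGetO (PySem.List.pyGetD t x []) y

def pvMapT (T : List (List Int)) : List (List (Option Int)) := T.map (List.map some)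

-- A's teleport scan, abstracted over a table of already-known option values
def pvScanA (grid : List (List Int)) (m n : Int) (prev : List (List (Option Int)))
    (x y : Int) (a : Option Int) : Option Int :=
  (PySem.List.pyRange 0 m 1).foldl (fun a i =>
    (PySem.List.pyRange 0 n 1).foldl (fun a j =>
      if pvGA grid i j ≤ pvGA grid x y then pvOMin a (pvGetO2 prev i j) else a) a) a

def pvPush (c : Option Int) (d : Int) : Option Int :=
  some (match c with | none => d | some e => min e d)

def pvMval (L : List Int) : Option Int := L.foldl pvPush none

def pvShape (m n : Int) (T : List (List Int)) : Prop :=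
  (T.length : Int) = m ∧ ∀ r ∈ T, (r.length : Int) = n

def pvCellsRM (grid : List (List Int)) (m n : Int) (T : List (List Int)) : List (Int × Int) :=
  (PySem.List.pyRange 0 m 1).flatMap fun i =>
      (PySem.List.pyRange 0 n 1).map fun j => (pvGB grid i j, pvGetI2 T i j)

def pvFiltSnd (v : Int) (cs : List (Int × Int)) : List Int :=
  (cs.filter (fun c => c.1 ≤ v)).map (·.2)

-- the matrix of A's dp values at a given teleport count
def dpVal (grid : List (List Int)) (m n t x y : Int) : Int := (dpP grid m n t x y).getD 0

def dpRowL (grid : List (List Int)) (m n t x : Int) : List Int :=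
  (PySem.List.pyRange 0 n 1).map (fun y => dpVal grid m n t x y)

def dpMat (grid : List (List Int)) (m n t : Int) : List (List Int) :=
  (PySem.List.pyRange 0 m 1).map (fun x => dpRowL grid m n t x)

theorem pvGB_eq_pvGA : pvGB = pvGA := rfl

theorem pv_push_rc : RightCommutative pvPush := by
  constructor; intro b a₁ a₂; cases b <;> simp only [pvPush] <;> congr 1 <;> omega

theorem pv_push_eq_omin (c : Option Int) (d : Int) : pvPush c d = pvOMin c (some d) := by
  cases c <;> rfl

theorem pv_omin_assoc (a b c : Option Int) : pvOMin (pvOMin a b) c = pvOMin a (pvOMin b c) := by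
  cases a <;> cases b <;> cases c <;> simp [pvOMin, min_assoc]

theorem pv_foldl_push (L : List Int) : ∀ a, L.foldl pvPush a = pvOMin a (pvMval L) := by
  induction L with
  | nil => intro a; cases a <;> rfl
  | cons d t ih =>
    intro a
    show t.foldl pvPush (pvPush a d) = pvOMin a (pvMval (d :: t))
    have h1 : pvMval (d :: t) = pvOMin (pvPush none d) (pvMval t) := ih (pvPush none d)
    have h2 : pvPush none d = some d := rfl
    rw [ih (pvPush a d), h1, pv_push_eq_omin, h2, pv_omin_assoc]

theorem pv_mval_perm {L1 L2 : List Int} (h : L1.Perm L2) : pvMval L1 = pvMval L2 :=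
  haveI := pv_push_rc
  h.foldl_eq none

theorem pv_foldl_flatMap {α β γ : Type} (l : List α) (f : α → List β) (g : γ → β → γ) (a : γ) :
    (l.flatMap f).foldl g a = l.foldl (fun x e => (f e).foldl g x) a := by
  induction l generalizing a with
  | nil => rfl
  | cons h t ih => simp [List.flatMap_cons, List.foldl_append, ih]

theorem pv_getO2_mapT {T : List (List Int)} {m n i j : Int} (hT : pvShape m n T)
    (hi0 : 0 ≤ i) (him : i < m) (hj0 : 0 ≤ j) (hjn : j < n) :
    pvGetO2 (pvMapT T) i j = some (pvGetI2 T i j) := by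
  obtain ⟨hlen, hrows⟩ := hT
  unfold pvGetO2 pvGetI2 pvGetO pvGetI pvMapT
  rw [PySem.List.pyGetD_eq_getElem _ _ hi0 (by simp; omega),
      PySem.List.pyGetD_eq_getElem _ _ hi0 (by omega)]
  simp only [List.getElem_map]
  have hr : (T[i.toNat].length : Int) = n := hrows _ (List.getElem_mem _)
  rw [PySem.List.pyGetD_eq_getElem _ _ hj0 (by simp; omega),
      PySem.List.pyGetD_eq_getElem _ _ hj0 (by omega)]
  simp

theorem pv_scan_eq {grid T m n x y} (hT : pvShape m n T) (a : Option Int) :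
    pvScanA grid m n (pvMapT T) x y a
      = pvOMin a (pvMval (pvFiltSnd (pvGA grid x y) (pvCellsRM grid m n T))) := by
  rw [← pv_foldl_push (pvFiltSnd (pvGA grid x y) (pvCellsRM grid m n T)) a]
  unfold pvScanA pvFiltSnd pvCellsRM
  rw [List.foldl_map, List.foldl_filter, pv_foldl_flatMap]
  apply PySem.List.foldl_congr_mem
  intro acc i hi
  rw [List.foldl_map]
  apply PySem.List.foldl_congr_mem
  intro a2 j hj
  obtain ⟨hi0, him⟩ := PySem.List.mem_pyRange_one.mp hi
  obtain ⟨hj0, hjn⟩ := PySem.List.mem_pyRange_one.mp hj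
  rw [pv_getO2_mapT hT hi0 him hj0 hjn, ← pv_push_eq_omin]
  simp [pvGB_eq_pvGA]

theorem pv_best_untouched (cells : List (Int × Int)) :
    ∀ (best : PySem.Dict Int Int) (cur : Option Int) (v : Int),
      (∀ c ∈ cells, c.1 ≠ v) →
      ((cells.foldl pvBestStep (best, cur)).1).get? v = best.get? v := by
  induction cells with
  | nil => intro best cur v _; rfl
  | cons hd t ih =>
    intro best cur v h
    rw [List.foldl_cons, ih _ _ _ (fun c hc => h c (List.mem_cons_of_mem _ hc))]
    exact PySem.Dict.get?_insert_of_ne _ _ (h hd (List.mem_cons_self)).symm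

theorem pv_best_lookup (cells : List (Int × Int))
    (hs : cells.Pairwise (fun a b => a.1 ≤ b.1)) (v : Int)
    (hv : ∃ c ∈ cells, c.1 = v) :
    ∀ (best : PySem.Dict Int Int) (cur : Option Int),
      ((cells.foldl pvBestStep (best, cur)).1).get? v = (pvFiltSnd v cells).foldl pvPush cur := by
  induction cells with
  | nil => exact absurd hv (by simp)
  | cons hd t ih =>
    obtain ⟨a, d⟩ := hd
    rw [List.pairwise_cons] at hs
    obtain ⟨ha, hs'⟩ := hs
    intro best cur
    by_cases hvt : ∃ c ∈ t, c.1 = v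
    · obtain ⟨c, hc, hcv⟩ := hvt
      have hav : a ≤ v := hcv ▸ ha c hc
      rw [List.foldl_cons, ih hs' ⟨c, hc, hcv⟩]
      have : pvFiltSnd v ((a, d) :: t) = d :: pvFiltSnd v t := by
        simp [pvFiltSnd, hav]
      rw [this, List.foldl_cons]
      rfl
    · have hva : v = a := by
        obtain ⟨c, hc, hcv⟩ := hv
        rcases List.mem_cons.mp hc with h | h
        · rw [h] at hcv; exact hcv.symm
        · exact absurd ⟨c, h, hcv⟩ hvt
      have hne : ∀ c ∈ t, c.1 ≠ v := fun c hc => fun he => hvt ⟨c, hc, he⟩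
      have hgt : ∀ c ∈ t, ¬ (c.1 ≤ v) := by
        intro c hc hle
        have := ha c hc
        exact hne c hc (by omega)
      have h1 : List.filter (fun c => decide (c.1 ≤ v)) t = [] := by
        rw [List.filter_eq_nil_iff]
        intro c hc; simpa using hgt c hc
      have hfilt : pvFiltSnd v ((a, d) :: t) = [d] := by
        simp only [pvFiltSnd, List.filter_cons]
        rw [if_pos (by simpa using (by omega : (a : Int) ≤ v)), h1]
        rfl
      rw [List.foldl_cons, pv_best_untouched t _ _ v hne, hfilt, List.foldl_cons,
          List.foldl_nil]
      show ((best.insert a _).get?) v = pvPush cur d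
      rw [hva, PySem.Dict.get?_insert_self]
      rfl

theorem pv_tele_entry {grid T m n x y} (_hT : pvShape m n T)
    (hx0 : 0 ≤ x) (hxm : x < m) (hy0 : 0 ≤ y) (hyn : y < n) :
    some (pvGetI2 (pvTeleB grid m n T) x y)
      = pvMval (pvFiltSnd (pvGA grid x y) (pvCellsRM grid m n T)) := by
  have hcell : (pvGB grid x y, pvGetI2 T x y) ∈ pvCellsRM grid m n T := by
    unfold pvCellsRM
    refine List.mem_flatMap.mpr ⟨x, PySem.List.mem_pyRange_one.mpr ⟨hx0, hxm⟩, ?_⟩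
    exact List.mem_map.mpr ⟨y, PySem.List.mem_pyRange_one.mpr ⟨hy0, hyn⟩, rfl⟩
  have hgv : pvGB grid x y = pvGA grid x y := rfl
  set v := pvGA grid x y with hvdef
  set cells := pvCellsRM grid m n T with hcdef
  set scells := PySem.List.sorted cells (fun c => c.1) false with hsdef
  have hmem : (pvGB grid x y, pvGetI2 T x y) ∈ scells :=
    (PySem.List.mem_sorted _ _ _ _).mpr hcell
  have hv : ∃ c ∈ scells, c.1 = v := ⟨_, hmem, hgv⟩
  have hs : scells.Pairwise (fun a b => a.1 ≤ b.1) := PySem.List.sorted_pairwise _ _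
  have hlook := pv_best_lookup scells hs v hv PySem.Dict.empty none
  have hperm : (pvFiltSnd v scells).Perm (pvFiltSnd v cells) :=
    ((PySem.List.sorted_perm cells (fun c => c.1) false).filter _).map _
  have hentry : pvGetI2 (pvTeleB grid m n T) x y
      = ((scells.foldl pvBestStep (PySem.Dict.empty, none)).1).getD v 0 := by
    show pvGetI2 ((PySem.List.pyRange 0 m 1).map fun x' => (PySem.List.pyRange 0 n 1).map fun y' =>
        ((scells.foldl pvBestStep (PySem.Dict.empty, none)).1).getD (pvGB grid x' y') 0) x y = _
    unfold pvGetI2 pvGetI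
    rw [PySem.List.pyGetD_map_pyRange_of_nonneg _ m x _ hx0 hxm,
        PySem.List.pyGetD_map_pyRange_of_nonneg _ n y _ hy0 hyn, hgv]
  have hne : pvMval (pvFiltSnd v scells) ≠ none := by
    have : pvGetI2 T x y ∈ pvFiltSnd v scells := by
      unfold pvFiltSnd
      refine List.mem_map.mpr ⟨_, List.mem_filter.mpr ⟨hmem, by simp [hgv]⟩, rfl⟩
    cases hL : pvFiltSnd v scells with
    | nil => rw [hL] at this; simp at this
    | cons d L =>
      rw [pvMval, List.foldl_cons, pv_foldl_push]
      cases (pvMval L) <;> simp [pvOMin, pvPush]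
  rw [hentry]
  rw [← pv_mval_perm hperm]
  rcases hcase : pvMval (pvFiltSnd v scells) with _ | w
  · exact absurd hcase hne
  · have : ((scells.foldl pvBestStep (PySem.Dict.empty, none)).1).get? v = some w := by
      rw [hlook]; exact hcase
    rw [PySem.Dict.getD_of_get?_eq_some _ _ this]

theorem pv_scan_tele {grid T m n x y} (hT : pvShape m n T)
    (hx0 : 0 ≤ x) (hxm : x < m) (hy0 : 0 ≤ y) (hyn : y < n) (a : Option Int) :
    pvScanA grid m n (pvMapT T) x y a
      = pvOMin a (some (pvGetI2 (pvTeleB grid m n T) x y)) := by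
  rw [pv_scan_eq hT, ← pv_tele_entry hT hx0 hxm hy0 hyn]

-- someness of the pure dp on in-range cells
theorem pv_foldl_keep {α : Type} (l : List α) (f : Option Int → α → Option Int)
    (hf : ∀ a b, a.isSome → (f a b).isSome) :
    ∀ a : Option Int, a.isSome → (l.foldl f a).isSome := by
  induction l with
  | nil => intro a h; exact h
  | cons hd t ih => intro a h; exact ih _ (hf a hd h)

theorem pv_omin_some_right (a : Option Int) (v : Int) : (pvOMin a (some v)).isSome := by
  cases a <;> rfl

theorem pv_omin_some_left (a b : Option Int) (h : a.isSome) : (pvOMin a b).isSome := by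
  cases a <;> cases b <;> simp_all [pvOMin]


theorem dp_some (grid : List (List Int)) (m n t x y : Int)
    (hx0 : 0 ≤ x) (hxm : x < m) (hy0 : 0 ≤ y) (hyn : y < n) :
    (dpP grid m n t x y).isSome := by
  rw [dpP]
  by_cases hg : x = m - 1 ∧ y = n - 1
  · rw [if_pos hg]; rfl
  · rw [if_neg hg]
    have hmove : x < m - 1 ∨ y < n - 1 := by omega
    have ha2 : (if _h : y < n - 1 then
        pvOMin (if _h : x < m - 1 then
            pvOMin none ((dpP grid m n t (x+1) y).map (· + pvGA grid (x+1) y))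
          else none)
          ((dpP grid m n t x (y+1)).map (· + pvGA grid x (y+1)))
        else (if _h : x < m - 1 then
            pvOMin none ((dpP grid m n t (x+1) y).map (· + pvGA grid (x+1) y))
          else none)).isSome := by
      by_cases hy : y < n - 1
      · rw [dif_pos hy]
        obtain ⟨v, hv⟩ := Option.isSome_iff_exists.mp
          (dp_some grid m n t x (y+1) hx0 hxm (by omega) (by omega))
        rw [hv]; exact pv_omin_some_right _ _
      · have hx : x < m - 1 := by omega
        rw [dif_neg hy, dif_pos hx]
        obtain ⟨v, hv⟩ := Option.isSome_iff_exists.mp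
          (dp_some grid m n t (x+1) y (by omega) (by omega) hy0 hyn)
        rw [hv]; rfl
    by_cases ht : 0 < t
    · rw [dif_pos ht]
      refine pv_foldl_keep _ _ ?_ _ ha2
      intro a i h
      refine pv_foldl_keep _ _ ?_ _ h
      intro a' j h'
      split
      · exact pv_omin_some_left _ _ h'
      · exact h'
    · rw [dif_neg ht]; exact ha2
termination_by (t.toNat, (m - x).toNat + (n - y).toNat)
decreasing_by
  · apply Prod.Lex.right; omega
  · apply Prod.Lex.right; omega

theorem dp_eq (grid : List (List Int)) (m n t x y : Int)
    (hx0 : 0 ≤ x) (hxm : x < m) (hy0 : 0 ≤ y) (hyn : y < n) :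
    dpP grid m n t x y = some (dpVal grid m n t x y) := by
  have h := dp_some grid m n t x y hx0 hxm hy0 hyn
  cases hd : dpP grid m n t x y with
  | none => rw [hd] at h; exact absurd h (by simp)
  | some v => unfold dpVal; rw [hd]; rfl

theorem dpRowL_get {grid : List (List Int)} {m n t x y : Int} (hy0 : 0 ≤ y) (hyn : y < n) :
    pvGetI (dpRowL grid m n t x) y = dpVal grid m n t x y := by
  unfold pvGetI dpRowL
  rw [PySem.List.pyGetD_map_pyRange_of_nonneg _ n y _ hy0 hyn]

theorem dpMat_entry {grid : List (List Int)} {m n t x y : Int}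
    (hx0 : 0 ≤ x) (hxm : x < m) (hy0 : 0 ≤ y) (hyn : y < n) :
    pvGetI2 (dpMat grid m n t) x y = dpVal grid m n t x y := by
  unfold pvGetI2 dpMat
  rw [PySem.List.pyGetD_map_pyRange_of_nonneg _ m x _ hx0 hxm]
  exact dpRowL_get hy0 hyn

theorem pv_shape_dpMat {grid : List (List Int)} {m n : Int} (hm0 : 0 ≤ m) (hn0 : 0 ≤ n)
    (t : Int) : pvShape m n (dpMat grid m n t) := by
  constructor
  · unfold dpMat
    rw [List.length_map, PySem.List.length_pyRange_one]; omega
  · intro r hr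
    unfold dpMat at hr
    obtain ⟨x, _, hx⟩ := List.mem_map.mp hr
    rw [← hx]
    unfold dpRowL
    rw [List.length_map, PySem.List.length_pyRange_one]; omega

-- one dp cell: A's recursion step equals B's candidate-list cell
theorem dp_cell {grid : List (List Int)} {m n t x y : Int}
    {below : Option (List Int)} {tele : Option (List (List Int))} {right : Option Int}
    (hx0 : 0 ≤ x) (hxm : x < m) (hy0 : 0 ≤ y) (hyn : y < n)
    (hb : (x < m - 1 ∧ below = some (dpRowL grid m n t (x+1))) ∨ (¬ x < m - 1 ∧ below = none))
    (hr : (y < n - 1 ∧ right = some (dpVal grid m n t x (y+1))) ∨ (¬ y < n - 1 ∧ right = none))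
    (ht : (0 < t ∧ tele = some (pvTeleB grid m n (dpMat grid m n (t-1)))) ∨ (¬ 0 < t ∧ tele = none)) :
    dpP grid m n t x y = some (pvCellB grid m n below tele right x y) := by
  have hm0 : (0:Int) ≤ m := by omega
  have hn0 : (0:Int) ≤ n := by omega
  rw [dpP]
  unfold pvCellB
  by_cases hg : x = m - 1 ∧ y = n - 1
  · rw [if_pos hg, if_pos hg]
  · rw [if_neg hg, if_neg hg]
    have hscan : ∀ a2 : Option Int, 0 < t →
        (PySem.List.pyRange 0 m 1).foldl (fun a i =>
          (PySem.List.pyRange 0 n 1).foldl (fun a j =>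
            if pvGA grid i j ≤ pvGA grid x y then pvOMin a (dpP grid m n (t-1) i j) else a) a) a2
        = pvOMin a2 (some (pvGetI2 (pvTeleB grid m n (dpMat grid m n (t-1))) x y)) := by
      intro a2 ht0
      have hT := pv_shape_dpMat (grid := grid) hm0 hn0 (t-1)
      rw [← pv_scan_tele hT hx0 hxm hy0 hyn a2]
      unfold pvScanA
      apply PySem.List.foldl_congr_mem
      intro acc i hi
      apply PySem.List.foldl_congr_mem
      intro a' j hj
      obtain ⟨hi0, him⟩ := PySem.List.mem_pyRange_one.mp hi
      obtain ⟨hj0, hjn⟩ := PySem.List.mem_pyRange_one.mp hj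
      rw [pv_getO2_mapT hT hi0 him hj0 hjn, dpMat_entry hi0 him hj0 hjn,
          dp_eq grid m n (t-1) i j hi0 him hj0 hjn]
    rcases hb with ⟨hx, hbe⟩ | ⟨hx, hbe⟩ <;>
      rcases hr with ⟨hy, hre⟩ | ⟨hy, hre⟩ <;>
        rcases ht with ⟨ht0, hte⟩ | ⟨ht0, hte⟩
    · subst hbe; subst hre; subst hte
      simp only [dif_pos hx, dif_pos hy, dif_pos ht0]
      rw [dp_eq grid m n t (x+1) y (by omega) (by omega) hy0 hyn,
          dp_eq grid m n t x (y+1) hx0 hxm (by omega) (by omega), hscan _ ht0,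
          dpRowL_get hy0 hyn]
      simp [pvOMin, pvMinList, pvGB_eq_pvGA, List.foldl]
    · subst hbe; subst hre; subst hte
      simp only [dif_pos hx, dif_pos hy, dif_neg ht0]
      rw [dp_eq grid m n t (x+1) y (by omega) (by omega) hy0 hyn,
          dp_eq grid m n t x (y+1) hx0 hxm (by omega) (by omega),
          dpRowL_get hy0 hyn]
      simp [pvOMin, pvMinList, pvGB_eq_pvGA, List.foldl]
    · subst hbe; subst hre; subst hte
      simp only [dif_pos hx, dif_neg hy, dif_pos ht0]
      rw [dp_eq grid m n t (x+1) y (by omega) (by omega) hy0 hyn, hscan _ ht0,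
          dpRowL_get hy0 hyn]
      simp [pvOMin, pvMinList, pvGB_eq_pvGA, List.foldl]
    · subst hbe; subst hre; subst hte
      simp only [dif_pos hx, dif_neg hy, dif_neg ht0]
      rw [dp_eq grid m n t (x+1) y (by omega) (by omega) hy0 hyn,
          dpRowL_get hy0 hyn]
      simp [pvOMin, pvMinList, pvGB_eq_pvGA, List.foldl]
    · subst hbe; subst hre; subst hte
      simp only [dif_neg hx, dif_pos hy, dif_pos ht0]
      rw [dp_eq grid m n t x (y+1) hx0 hxm (by omega) (by omega), hscan _ ht0]
      simp [pvOMin, pvMinList, pvGB_eq_pvGA, List.foldl]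
    · subst hbe; subst hre; subst hte
      simp only [dif_neg hx, dif_pos hy, dif_neg ht0]
      rw [dp_eq grid m n t x (y+1) hx0 hxm (by omega) (by omega)]
      simp [pvOMin, pvMinList, pvGB_eq_pvGA, List.foldl]
    · exact absurd ⟨by omega, by omega⟩ hg
    · exact absurd ⟨by omega, by omega⟩ hg

-- B's row construction produces the row of A's dp values
theorem pv_row_dp {grid : List (List Int)} {m n t x : Int}
    {below : Option (List Int)} {tele : Option (List (List Int))}
    (hx0 : 0 ≤ x) (hxm : x < m)
    (hb : (x < m - 1 ∧ below = some (dpRowL grid m n t (x+1))) ∨ (¬ x < m - 1 ∧ below = none))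
    (ht : (0 < t ∧ tele = some (pvTeleB grid m n (dpMat grid m n (t-1)))) ∨ (¬ 0 < t ∧ tele = none)) :
    ∀ (fuel : Nat) (y : Int) (rowB : List Int), (fuel : Int) = y + 1 → (fuel : Int) ≤ n →
      rowB = (PySem.List.pyRange (y+1) n 1).map (fun j => dpVal grid m n t x j) →
      pvRowB grid m n x below tele fuel y rowB = dpRowL grid m n t x := by
  intro fuel
  induction fuel with
  | zero =>
    intro y rowB hf _ hrow
    subst hrow
    have hy : y + 1 = 0 := by omega
    simp only [pvRowB]
    rw [hy]
    rfl
  | succ f ih =>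
    intro y rowB hf hfn hrow
    have hy0 : 0 ≤ y := by omega
    have hyn : y < n := by omega
    have hhead : (y < n - 1 ∧ rowB.head? = some (dpVal grid m n t x (y+1)))
        ∨ (¬ y < n - 1 ∧ rowB.head? = none) := by
      by_cases hy : y < n - 1
      · left
        refine ⟨hy, ?_⟩
        rw [hrow, PySem.List.pyRange_one_cons (by omega)]
        rfl
      · right
        refine ⟨hy, ?_⟩
        rw [hrow, PySem.List.pyRange_one_eq_nil (by omega)]
        rfl
    have hcell : pvCellB grid m n below tele rowB.head? x y = dpVal grid m n t x y := by
      have h1 := dp_cell hx0 hxm hy0 hyn hb hhead ht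
      have h2 := dp_eq grid m n t x y hx0 hxm hy0 hyn
      rw [h1] at h2
      exact Option.some.inj h2
    rw [pvRowB, hcell]
    refine ih (y - 1) _ (by omega) (by omega) ?_
    rw [hrow, show y - 1 + 1 = y by omega,
        show PySem.List.pyRange y n 1 = y :: PySem.List.pyRange (y+1) n 1 from
          PySem.List.pyRange_one_cons (by omega)]
    rfl

-- B's table construction produces the matrix of A's dp values
theorem pv_table_dp {grid : List (List Int)} {m n t : Int}
    {tele : Option (List (List Int))} (hn : 0 < n)
    (ht : (0 < t ∧ tele = some (pvTeleB grid m n (dpMat grid m n (t-1)))) ∨ (¬ 0 < t ∧ tele = none)) :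
    ∀ (fuel : Nat) (x : Int) (rows : List (List Int)), (fuel : Int) = x + 1 → (fuel : Int) ≤ m →
      rows = (PySem.List.pyRange (x+1) m 1).map (fun i => dpRowL grid m n t i) →
      pvTableB grid m n tele fuel x rows = dpMat grid m n t := by
  intro fuel
  induction fuel with
  | zero =>
    intro x rows hf _ hrows
    subst hrows
    have hx : x + 1 = 0 := by omega
    simp only [pvTableB]
    rw [hx]
    rfl
  | succ f ih =>
    intro x rows hf hfm hrows
    have hx0 : 0 ≤ x := by omega
    have hxm : x < m := by omega
    have hhead : (x < m - 1 ∧ rows.head? = some (dpRowL grid m n t (x+1)))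
        ∨ (¬ x < m - 1 ∧ rows.head? = none) := by
      by_cases hx : x < m - 1
      · left
        refine ⟨hx, ?_⟩
        rw [hrows, PySem.List.pyRange_one_cons (by omega)]
        rfl
      · right
        refine ⟨hx, ?_⟩
        rw [hrows, PySem.List.pyRange_one_eq_nil (by omega)]
        rfl
    have hrowx : pvRowB grid m n x rows.head? tele n.toNat (n - 1) [] = dpRowL grid m n t x := by
      refine pv_row_dp hx0 hxm hhead ht n.toNat (n - 1) [] (by omega) (by omega) ?_
      rw [show n - 1 + 1 = n by omega, PySem.List.pyRange_one_eq_nil (by omega)]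
      rfl
    rw [pvTableB, hrowx]
    refine ih (x - 1) _ (by omega) (by omega) ?_
    rw [hrows, show x - 1 + 1 = x by omega,
        show PySem.List.pyRange x m 1 = x :: PySem.List.pyRange (x+1) m 1 from
          PySem.List.pyRange_one_cons (by omega)]
    rfl

-- the iterated B step at level (max t 0) is the matrix of dp values with t teleports
theorem pv_iter_dp {grid : List (List Int)} {m n : Int} (hm : 0 < m) (hn : 0 < n) :
    ∀ (s : Nat) (t : Int), (max t 0).toNat = s →
      (pvStepB grid m n)^[s] (pvTableB grid m n none m.toNat (m - 1) [])
        = dpMat grid m n t := by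
  intro s
  induction s with
  | zero =>
    intro t hts
    have ht0 : ¬ 0 < t := by omega
    show pvTableB grid m n none m.toNat (m - 1) [] = _
    refine pv_table_dp hn (Or.inr ⟨ht0, rfl⟩) m.toNat (m - 1) [] (by omega) (by omega) ?_
    rw [show m - 1 + 1 = m by omega, PySem.List.pyRange_one_eq_nil (by omega)]
    rfl
  | succ s ih =>
    intro t hts
    have ht0 : 0 < t := by omega
    rw [Function.iterate_succ_apply', ih (t-1) (by omega)]
    exact pv_table_dp hn (Or.inl ⟨ht0, rfl⟩) m.toNat (m - 1) [] (by omega) (by omega)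
      (by rw [show m - 1 + 1 = m by omega, PySem.List.pyRange_one_eq_nil (by omega)]; rfl)

-- B's early-stopping loop equals plain iteration (a fixed point stays fixed)
theorem pv_loop_eq {grid : List (List Int)} {m n : Int} :
    ∀ (fuel : Nat) (T : List (List Int)),
      pvLoopB grid m n fuel T = (pvStepB grid m n)^[fuel] T := by
  intro fuel
  induction fuel with
  | zero => intro T; rfl
  | succ f ih =>
    intro T
    show (let new := pvStepB grid m n T; if new = T then T else pvLoopB grid m n f new) = _
    by_cases h : pvStepB grid m n T = T
    · simp only [h]
      exact (Function.iterate_fixed h (f + 1)).symm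
    · simp only [if_neg h, ih]
      rw [Function.iterate_succ_apply]

-- ===== VERDICT (by name: the statement is the Claim_ definition above) =====
theorem minCost_tle_spec : Claim_equal_minCost_tle := by
  intro grid k _dom hpre
  obtain ⟨hne, hn1, _hrows⟩ := hpre
  show minCost_tle grid k = minCost_tle_alt grid k
  have hEq0 : PySem.List.pyGetD grid 0 ([] : List Int) = grid.headD [] := by
    rw [PySem.List.pyGetD_zero]; cases grid <;> rfl
  simp only [minCost_tle, minCost_tle_alt, hEq0]
  have hm1 : (0 : Int) < (grid.length : Int) := by
    cases grid with | nil => exact absurd rfl hne | cons a t => simp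
  have hempty : pvGoodMemo grid (grid.length : Int) ((grid.headD []).length : Int)
      PySem.Dict.empty := by
    intro t x y r h
    rw [PySem.Dict.get?_empty] at h
    cases h
  rw [pv_loop_eq, pv_iter_dp hm1 hn1 (max k 0).toNat k rfl,
      dpMat_entry le_rfl hm1 le_rfl hn1,
      (dpA_correct grid (grid.length : Int) ((grid.headD []).length : Int)
        (pvBnd (grid.length : Int) ((grid.headD []).length : Int) k 0 0 + 1)
        PySem.Dict.empty k 0 0 hempty (Nat.lt_succ_self _)).1,
      dp_eq grid (grid.length : Int) ((grid.headD []).length : Int) k 0 0 le_rfl hm1 le_rfl hn1]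
  rfl
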